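-- pv_equiv track=rewrite | github.com/kimvandenhouten/SeclinPyJobShop | factory_data/data_reading_functions/process_tanks.py | remove_redundant_sets
-- ===== SOURCE A (Python) =====
-- def remove_redundant_sets(sets):
--     # Sort by length descending
--     sets = [set(x) for x in sets]
--     sets.sort(key=lambda s: -len(s))
--
--     # Copy the list to work on
--     filtered = sets.copy()
--
--     for current in sets:
--         # Check if any other set in the list is a proper subset of `current`
--         if any(other < current for other in filtered if other != current):
--             filtered.remove(current)
--
--     # Optionally convert back to sorted tuples
--     result = [tuple(sorted(s)) for s in filtered]
--
--     return result
-- ===== SOURCE B (Python) =====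
-- def remove_redundant_sets(sets):
--     ss = [frozenset(x) for x in sets]
--     # Stage 1: build the index of minimal sets, scanning in ascending-length order,
--     # so every proper subset of s has already been considered when s arrives.
--     minimal = []
--     for s in sorted(ss, key=len):
--         if not any(m < s for m in minimal):
--             minimal.append(s)
--     # Stage 2: emit, in descending-length order (stable), the sets whose value is minimal.
--     return [tuple(sorted(s)) for s in sorted(ss, key=lambda s: -len(s)) if s in minimal]
-- ===== Notes on version B (the rewrite author's own statement) =====
-- stated objective: alternative
-- what changed: A filters by mutating one list in place (repeated remove during iteration); B is a two-stage decomposition: scan in ascending-length order to build an index of minimal sets, then filter the descending-length order by membership in that index.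
import Mathlib
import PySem

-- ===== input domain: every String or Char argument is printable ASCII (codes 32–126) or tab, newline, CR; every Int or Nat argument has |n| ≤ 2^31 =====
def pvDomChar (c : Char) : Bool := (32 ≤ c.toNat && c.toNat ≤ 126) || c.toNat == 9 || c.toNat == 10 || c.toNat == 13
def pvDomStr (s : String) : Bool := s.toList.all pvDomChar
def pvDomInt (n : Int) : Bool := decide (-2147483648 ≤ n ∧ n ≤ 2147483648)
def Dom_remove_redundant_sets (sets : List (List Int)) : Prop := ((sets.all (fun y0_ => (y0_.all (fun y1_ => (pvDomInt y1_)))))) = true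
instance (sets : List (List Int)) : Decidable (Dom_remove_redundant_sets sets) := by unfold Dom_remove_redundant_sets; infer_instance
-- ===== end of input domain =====

-- B replaces A's mutate-while-iterating single filtered list by a two-stage decomposition
-- (build a minimal-set index in ascending-length order, then filter the descending order);
-- objective: alternative (same asymptotic cost, no in-place mutation).

-- ===== PORT A =====
-- Python's proper-subset test `a < b` on sets (shared by both ports).
def pvLt (a b : List Int) : Bool := PySem.Set.issubset a b && !(PySem.Set.equal a b)

-- `filtered.remove(current)`: drop the first element set-equal to current.
-- (Python raises ValueError when no match; A only calls it when a match is present,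
-- so the [] case below is unreachable in A's loop.)
def pvRemoveEq : List (List Int) → List Int → List (List Int)
  | [], _ => []
  | f :: fs, c => if PySem.Set.equal f c then fs else f :: pvRemoveEq fs c

def remove_redundant_sets (sets : List (List Int)) : List (List Int) :=
  let ss := sets.map (fun x => PySem.Set.ofList x)
  let sortedSS := PySem.List.sorted ss (fun s => -(PySem.Set.len s)) false
  let filtered := sortedSS.foldl
    (fun f current =>
      if f.any (fun o => !(PySem.Set.equal o current) && pvLt o current) then
        pvRemoveEq f current
      else f)
    sortedSS
  filtered.map (fun s => PySem.List.sorted s (fun x => x) false)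

-- ===== PORT B =====
def remove_redundant_sets_alt (sets : List (List Int)) : List (List Int) :=
  let ss := sets.map (fun x => PySem.Set.ofList x)
  let minimal := (PySem.List.sorted ss (fun s => PySem.Set.len s) false).foldl
    (fun acc s => if acc.any (fun m => pvLt m s) then acc else acc ++ [s]) []
  ((PySem.List.sorted ss (fun s => -(PySem.Set.len s)) false).filter
      (fun s => minimal.any (fun m => PySem.Set.equal s m))).map
    (fun s => PySem.List.sorted s (fun x => x) false)

-- ===== PRECONDITION & SPEC =====
def Spec_remove_redundant_sets (sets : List (List Int)) (out : List (List Int)) : Prop := out = remove_redundant_sets_alt sets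
instance (sets : List (List Int)) (out : List (List Int)) : Decidable (Spec_remove_redundant_sets sets out) := by unfold Spec_remove_redundant_sets; infer_instance

-- ===== CLAIM (what is proved, stated in full; the proofs are below) =====
def Claim_equal_remove_redundant_sets : Prop := ∀ (sets : List (List Int)), Dom_remove_redundant_sets sets → Spec_remove_redundant_sets sets (remove_redundant_sets sets)

-- ===== LEMMAS AND PROOFS =====

-- pvIsMin ss s: s has no proper subset among the members of ss.
def pvIsMin (ss : List (List Int)) (s : List Int) : Bool := !(ss.any (fun t => pvLt t s))

theorem pvLt_iff (a b : List Int) :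
    pvLt a b = true ↔ (∀ x ∈ a, x ∈ b) ∧ ¬(∀ x ∈ b, x ∈ a) := by
  simp only [pvLt, Bool.and_eq_true, Bool.not_eq_true',
    PySem.Set.issubset_iff, ← Bool.not_eq_true, PySem.Set.equal_iff]
  constructor
  · rintro ⟨h1, h2⟩
    exact ⟨h1, fun hba => h2 (fun x => ⟨fun hx => h1 x hx, fun hx => hba x hx⟩)⟩
  · rintro ⟨h1, h2⟩
    exact ⟨h1, fun he => h2 (fun x hx => (he x).2 hx)⟩

theorem pvEq_refl (s : List Int) : PySem.Set.equal s s = true := by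
  simp [PySem.Set.equal_iff]

theorem pvLt_congr_right {s m : List Int} (h : PySem.Set.equal s m = true) (t : List Int) :
    pvLt t s = pvLt t m := by
  have hm := (PySem.Set.equal_iff s m).1 h
  apply Bool.eq_iff_iff.2
  rw [pvLt_iff, pvLt_iff]
  constructor
  · rintro ⟨h1, h2⟩
    exact ⟨fun x hx => (hm x).1 (h1 x hx), fun hc => h2 (fun x hx => hc x ((hm x).1 hx))⟩
  · rintro ⟨h1, h2⟩
    exact ⟨fun x hx => (hm x).2 (h1 x hx), fun hc => h2 (fun x hx => hc x ((hm x).2 hx))⟩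

theorem pvIsMin_congr {s m : List Int} (ss : List (List Int))
    (h : PySem.Set.equal s m = true) : pvIsMin ss s = pvIsMin ss m := by
  have hf : (fun t => pvLt t s) = (fun t => pvLt t m) := funext (pvLt_congr_right h)
  rw [pvIsMin, pvIsMin, hf]

theorem pvIsMin_iff (ss : List (List Int)) (s : List Int) :
    pvIsMin ss s = true ↔ ∀ t ∈ ss, ¬ pvLt t s = true := by
  simp [pvIsMin]

theorem pvLt_length {a b : List Int} (ha : a.Nodup) (hb : b.Nodup)
    (h : pvLt a b = true) : a.length < b.length := by
  obtain ⟨h1, h2⟩ := (pvLt_iff a b).1 h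
  have hsub : a.toFinset ⊆ b.toFinset := by
    intro x hx
    simp only [List.mem_toFinset] at hx ⊢
    exact h1 x hx
  have hss : a.toFinset ⊂ b.toFinset := by
    refine Finset.ssubset_def.2 ⟨hsub, fun hba => h2 ?_⟩
    intro x hx
    have := hba (List.mem_toFinset.2 hx)
    exact List.mem_toFinset.1 this
  have := Finset.card_lt_card hss
  rwa [List.toFinset_card_of_nodup ha, List.toFinset_card_of_nodup hb] at this

theorem pvExistsMin (ss : List (List Int)) (hn : ∀ s ∈ ss, s.Nodup) :
    ∀ (n : Nat) (t : List Int), t.length ≤ n → t ∈ ss →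
      ∃ u ∈ ss, (∀ x ∈ u, x ∈ t) ∧ pvIsMin ss u = true := by
  intro n
  induction n with
  | zero =>
    intro t hlen ht
    by_cases h : pvIsMin ss t = true
    · exact ⟨t, ht, fun x hx => hx, h⟩
    · rw [Bool.not_eq_true, pvIsMin] at h
      simp only [Bool.not_eq_false', List.any_eq_true] at h
      obtain ⟨t', ht', hlt⟩ := h
      have := pvLt_length (hn t' ht') (hn t ht) hlt
      omega
  | succ n ih =>
    intro t hlen ht
    by_cases h : pvIsMin ss t = true
    · exact ⟨t, ht, fun x hx => hx, h⟩
    · rw [Bool.not_eq_true, pvIsMin] at h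
      simp only [Bool.not_eq_false', List.any_eq_true] at h
      obtain ⟨t', ht', hlt⟩ := h
      have hl := pvLt_length (hn t' ht') (hn t ht) hlt
      obtain ⟨u, hu, hsub, hmin⟩ := ih t' (by omega) ht'
      obtain ⟨h1, _⟩ := (pvLt_iff t' t).1 hlt
      exact ⟨u, hu, fun x hx => h1 x (hsub x hx), hmin⟩

theorem pvRemoveEq_append {Pm R' : List (List Int)} {c : List Int}
    (h : ∀ m ∈ Pm, PySem.Set.equal m c = false) :
    pvRemoveEq (Pm ++ c :: R') c = Pm ++ R' := by
  induction Pm with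
  | nil => simp [pvRemoveEq, pvEq_refl]
  | cons m Pm ih =>
    have hm := h m (List.mem_cons_self ..)
    simp only [List.cons_append, pvRemoveEq, hm]
    simp only [Bool.false_eq_true, if_false, List.cons.injEq, true_and]
    exact ih (fun x hx => h x (List.mem_cons_of_mem _ hx))

theorem pvLoopA (ss L : List (List Int)) (hmem : ∀ s, s ∈ L ↔ s ∈ ss)
    (hn : ∀ s ∈ ss, s.Nodup) :
    ∀ (R P : List (List Int)), P ++ R = L →
      R.foldl (fun f current =>
          if f.any (fun o => !(PySem.Set.equal o current) && pvLt o current) then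
            pvRemoveEq f current
          else f) (P.filter (pvIsMin ss) ++ R) = L.filter (pvIsMin ss) := by
  intro R
  induction R with
  | nil =>
    intro P h
    simp only [List.append_nil] at h
    subst h
    simp
  | cons c R' ih =>
    intro P hPL
    have hcL : c ∈ L := by rw [← hPL]; exact List.mem_append_right _ (List.mem_cons_self ..)
    have hFmem : ∀ o, o ∈ P.filter (pvIsMin ss) ++ c :: R' → o ∈ ss := by
      intro o ho
      rcases List.mem_append.1 ho with h1 | h2
      · exact (hmem o).1 (hPL ▸ List.mem_append_left _ (List.mem_of_mem_filter h1))
      · exact (hmem o).1 (hPL ▸ List.mem_append_right _ h2)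
    simp only [List.foldl_cons]
    by_cases hmin : pvIsMin ss c = true
    · -- condition is false, no removal
      have hcond : (P.filter (pvIsMin ss) ++ c :: R').any
          (fun o => !(PySem.Set.equal o c) && pvLt o c) = false := by
        rw [List.any_eq_false]
        intro o ho
        have hno := (pvIsMin_iff ss c).1 hmin o (hFmem o ho)
        have hlt : pvLt o c = false := Bool.eq_false_iff.2 hno
        simp [hlt]
      rw [hcond]
      simp only [Bool.false_eq_true, if_false]
      have hre : P.filter (pvIsMin ss) ++ c :: R' = (P ++ [c]).filter (pvIsMin ss) ++ R' := by
        simp [List.filter_append, hmin]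
      rw [hre]
      exact ih (P ++ [c]) (by rw [List.append_assoc]; exact hPL)
    · -- condition fires: c is not minimal, the first set-equal occurrence (c itself) is removed
      have hminf : pvIsMin ss c = false := Bool.eq_false_iff.2 hmin
      have hex : ∃ t ∈ ss, pvLt t c = true := by
        have := hminf
        simp only [pvIsMin, Bool.not_eq_false', List.any_eq_true] at this
        exact this
      obtain ⟨t, htss, hltc⟩ := hex
      obtain ⟨u, huss, husub, humin⟩ := pvExistsMin ss hn t.length t le_rfl htss
      have hltuc : pvLt u c = true := by
        obtain ⟨h1, h2⟩ := (pvLt_iff t c).1 hltc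
        refine (pvLt_iff u c).2 ⟨fun x hx => h1 x (husub x hx), fun hcu => h2 ?_⟩
        exact fun x hx => husub x (hcu x hx)
      have hne : PySem.Set.equal u c = false := by
        rcases Bool.eq_false_or_eq_true (PySem.Set.equal u c) with h | h
        swap
        · exact h
        · rw [pvIsMin_congr ss h] at humin
          rw [humin] at hminf
          exact absurd hminf (by simp)
      have huF : u ∈ P.filter (pvIsMin ss) ++ c :: R' := by
        have huL : u ∈ L := (hmem u).2 huss
        rw [← hPL] at huL
        rcases List.mem_append.1 huL with h1 | h2
        · exact List.mem_append_left _ (List.mem_filter.2 ⟨h1, humin⟩)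
        · exact List.mem_append_right _ h2
      have hcond : (P.filter (pvIsMin ss) ++ c :: R').any
          (fun o => !(PySem.Set.equal o c) && pvLt o c) = true := by
        rw [List.any_eq_true]
        exact ⟨u, huF, by simp [hne, hltuc]⟩
      rw [hcond]
      simp only [if_true]
      have hrem : pvRemoveEq (P.filter (pvIsMin ss) ++ c :: R') c = P.filter (pvIsMin ss) ++ R' := by
        apply pvRemoveEq_append
        intro m hm
        rcases Bool.eq_false_or_eq_true (PySem.Set.equal m c) with h | h
        swap
        · exact h
        · have := (List.mem_filter.1 hm).2
          rw [pvIsMin_congr ss h] at this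
          rw [this] at hminf
          exact absurd hminf (by simp)
      rw [hrem]
      have hre : P.filter (pvIsMin ss) ++ R' = (P ++ [c]).filter (pvIsMin ss) ++ R' := by
        simp [List.filter_append, hminf]
      rw [hre]
      exact ih (P ++ [c]) (by rw [List.append_assoc]; exact hPL)

theorem pvLoopB (ss : List (List Int)) (hn : ∀ s ∈ ss, s.Nodup) :
    ∀ (R Q acc : List (List Int)),
      Q ++ R = PySem.List.sorted ss (fun s => PySem.Set.len s) false →
      (∀ m ∈ acc, m ∈ ss) →
      (∀ m ∈ acc, pvIsMin ss m = true) →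
      (∀ u ∈ Q, pvIsMin ss u = true → u ∈ acc) →
      (∀ m ∈ R.foldl (fun acc s => if acc.any (fun m => pvLt m s) then acc else acc ++ [s]) acc,
          m ∈ ss ∧ pvIsMin ss m = true) ∧
      (∀ u ∈ Q ++ R, pvIsMin ss u = true →
          u ∈ R.foldl (fun acc s => if acc.any (fun m => pvLt m s) then acc else acc ++ [s]) acc) := by
  intro R
  induction R with
  | nil =>
    intro Q acc hQ ha hb hc
    simp only [List.foldl_nil, List.append_nil]
    exact ⟨fun m hm => ⟨ha m hm, hb m hm⟩, hc⟩
  | cons s R' ih =>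
    intro Q acc hQ ha hb hc
    have hsss : s ∈ ss := by
      have : s ∈ Q ++ s :: R' := List.mem_append_right _ (List.mem_cons_self ..)
      rw [hQ] at this
      exact (PySem.List.mem_sorted ss _ false s).1 this
    simp only [List.foldl_cons]
    by_cases hany : acc.any (fun m => pvLt m s) = true
    · rw [hany]
      simp only [if_true]
      have hres := ih (Q ++ [s]) acc (by rw [List.append_assoc]; exact hQ) ha hb ?side
      case side =>
        intro u hu humin
        rcases List.mem_append.1 hu with h1 | h2
        · exact hc u h1 humin
        · -- u = s, but s is not minimal since some acc member is a proper subset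
          obtain ⟨m, hm, hlt⟩ := List.any_eq_true.1 hany
          rw [List.mem_singleton.1 h2] at humin
          exact absurd hlt ((pvIsMin_iff ss s).1 humin m (ha m hm))
      refine ⟨hres.1, fun u hu => hres.2 u ?_⟩
      rw [List.append_assoc]
      exact hu
    · rw [Bool.not_eq_true] at hany
      rw [hany]
      simp only [Bool.false_eq_true, if_false]
      -- s is minimal: otherwise a minimal proper subset u of s, strictly shorter,
      -- appears earlier in the ascending order, hence is in acc, contradicting hany
      have hsmin : pvIsMin ss s = true := by
        by_contra hns
        have hsf : pvIsMin ss s = false := Bool.eq_false_iff.2 hns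
        have hex : ∃ t ∈ ss, pvLt t s = true := by
          have := hsf
          simp only [pvIsMin, Bool.not_eq_false', List.any_eq_true] at this
          exact this
        obtain ⟨t, htss, hlts⟩ := hex
        obtain ⟨u, huss, husub, humin⟩ := pvExistsMin ss hn t.length t le_rfl htss
        have hltus : pvLt u s = true := by
          obtain ⟨h1, h2⟩ := (pvLt_iff t s).1 hlts
          refine (pvLt_iff u s).2 ⟨fun x hx => h1 x (husub x hx), fun hsu => h2 ?_⟩
          exact fun x hx => husub x (hsu x hx)
        have hlen : u.length < s.length := pvLt_length (hn u huss) (hn s hsss) hltus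
        have huasc : u ∈ Q ++ s :: R' := by
          rw [hQ]
          exact (PySem.List.mem_sorted ss _ false u).2 huss
        have huQ : u ∈ Q := by
          rcases List.mem_append.1 huasc with h1 | h2
          · exact h1
          · exfalso
            have hpw := PySem.List.sorted_pairwise ss (fun s => PySem.Set.len s)
            rw [← hQ] at hpw
            have hpw2 := (List.pairwise_append.1 hpw).2.1
            rcases List.mem_cons.1 h2 with h3 | h4
            · rw [h3] at hlen; omega
            · have := (List.pairwise_cons.1 hpw2).1 u h4
              simp only [PySem.Set.len] at this
              omega
        exact absurd (List.any_eq_true.2 ⟨u, hc u huQ humin, hltus⟩) (by rw [hany]; simp)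
      have hres := ih (Q ++ [s]) (acc ++ [s]) (by rw [List.append_assoc]; exact hQ) ?a ?b ?c
      case a =>
        intro m hm
        rcases List.mem_append.1 hm with h1 | h2
        · exact ha m h1
        · rw [List.mem_singleton.1 h2]; exact hsss
      case b =>
        intro m hm
        rcases List.mem_append.1 hm with h1 | h2
        · exact hb m h1
        · rw [List.mem_singleton.1 h2]; exact hsmin
      case c =>
        intro u hu
        rcases List.mem_append.1 hu with h1 | h2
        · intro humin
          exact List.mem_append_left _ (hc u h1 humin)
        · exact fun _ => List.mem_append_right _ h2
      refine ⟨hres.1, fun u hu => hres.2 u ?_⟩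
      rw [List.append_assoc]
      exact hu


theorem pvFinal (sets : List (List Int)) :
    remove_redundant_sets sets = remove_redundant_sets_alt sets := by
  simp only [remove_redundant_sets, remove_redundant_sets_alt]
  set ss := sets.map (fun x => PySem.Set.ofList x) with hss
  have hn : ∀ s ∈ ss, s.Nodup := by
    intro s hs
    obtain ⟨x, _, rfl⟩ := List.mem_map.1 hs
    exact PySem.Set.nodup_ofList x
  set L := PySem.List.sorted ss (fun s => -(PySem.Set.len s)) false with hL
  have hmem : ∀ s, s ∈ L ↔ s ∈ ss := fun s => PySem.List.mem_sorted ss _ false s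
  have hA := pvLoopA ss L hmem hn L [] rfl
  simp only [List.filter_nil, List.nil_append] at hA
  rw [hA]
  congr 1
  apply (List.filter_congr ?_).symm
  intro s hsL
  have hsss : s ∈ ss := (hmem s).1 hsL
  have hB := pvLoopB ss hn (PySem.List.sorted ss (fun s => PySem.Set.len s) false) [] []
    rfl (by simp) (by simp) (by simp)
  simp only [List.nil_append] at hB
  obtain ⟨hB1, hB2⟩ := hB
  by_cases hmin : pvIsMin ss s = true
  · rw [hmin]
    rw [List.any_eq_true]
    exact ⟨s, hB2 s ((PySem.List.mem_sorted ss _ false s).2 hsss) hmin, pvEq_refl s⟩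
  · have hminf : pvIsMin ss s = false := Bool.eq_false_iff.2 hmin
    rw [hminf]
    rw [List.any_eq_false]
    intro m hm
    have hmmin := (hB1 m hm).2
    rcases Bool.eq_false_or_eq_true (PySem.Set.equal s m) with h | h
    · rw [pvIsMin_congr ss h, hmmin] at hminf
      exact absurd hminf (by simp)
    · simp [h]

-- ===== VERDICT (by name: the statement is the Claim_ definition above) =====
theorem remove_redundant_sets_spec : Claim_equal_remove_redundant_sets := by
  intro sets _
  unfold Spec_remove_redundant_sets
  exact pvFinal sets
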